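-- pv_equiv track=rewrite | github.com/bloodsweatengineers/PRO-K | Gen/generate.py | retrieve_bin_command
-- ===== SOURCE A (Python) =====
-- def retrieve_bin_command(token, binary, channel):
--     string = "\tenum tok_t retrieve_bin_command(uint8_t command) {\n"
--     with_channel = list()
--     without_channel = list()
--     for i in range(0, len(binary)):
--         if int(channel[i]) > 0:
--             with_channel.append([token[i],binary[i]])
--         else:
--             without_channel.append([token[i],binary[i]])
--     string += "\t\tswitch(command) {\n"
--     for i in range(0, len(without_channel)):
--         string += "\t\t\tcase {}:\n".format(without_channel[i][1])
--         string += "\t\t\t\treturn {};\n".format(without_channel[i][0])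
--     string += "\t\t}\n"
--     string += "\t\tswitch(command&0x0F) {\n"
--     for i in range(0, len(with_channel)):
--         string += "\t\t\tcase {}:\n".format(with_channel[i][1])
--         string += "\t\t\t\treturn {};\n".format(with_channel[i][0])
--     string += "\t\t}\n"
--     string += "\t\treturn REJECT;\n"
--     string += "\t}\n"
--     return string
-- ===== SOURCE B (Python) =====
-- def retrieve_bin_command(token, binary, channel):
--     with_body = ""
--     without_body = ""
--     for i in range(len(binary)):
--         entry = "\t\t\tcase {}:\n\t\t\t\treturn {};\n".format(binary[i], token[i])
--         if int(channel[i]) > 0: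
--             with_body += entry
--         else:
--             without_body += entry
--     return ("\tenum tok_t retrieve_bin_command(uint8_t command) {\n"
--             "\t\tswitch(command) {\n" + without_body + "\t\t}\n"
--             "\t\tswitch(command&0x0F) {\n" + with_body + "\t\t}\n"
--             "\t\treturn REJECT;\n\t}\n")
-- ===== Notes on version B (the rewrite author's own statement) =====
-- stated objective: simpler
-- what changed: B drops A's intermediate with_channel/without_channel pair lists and its two render loops: a single pass over range(len(binary)) formats each case/return entry once and appends it directly to one of two string bodies, then the result is assembled by plain concatenation.
import Mathlib
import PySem

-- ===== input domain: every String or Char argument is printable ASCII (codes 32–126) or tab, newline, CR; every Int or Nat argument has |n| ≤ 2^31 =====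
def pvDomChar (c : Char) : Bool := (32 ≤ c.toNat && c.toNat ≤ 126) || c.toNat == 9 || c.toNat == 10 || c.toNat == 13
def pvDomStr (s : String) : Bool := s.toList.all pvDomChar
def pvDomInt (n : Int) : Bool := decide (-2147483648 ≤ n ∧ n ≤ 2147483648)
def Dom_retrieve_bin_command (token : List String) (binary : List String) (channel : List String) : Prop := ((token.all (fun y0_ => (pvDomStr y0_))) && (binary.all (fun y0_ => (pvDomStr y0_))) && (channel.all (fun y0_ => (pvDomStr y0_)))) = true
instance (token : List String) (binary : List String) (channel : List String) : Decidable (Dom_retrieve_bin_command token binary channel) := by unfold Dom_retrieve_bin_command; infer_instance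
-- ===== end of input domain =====

-- B emits each formatted case/return entry directly into one of two string bodies in a single
-- pass, instead of A's pair lists plus two separate render loops; objective: simpler.

-- ===== PORT A =====
-- literal transliteration of A: build the two pair lists, then render each with an index loop
def retrieve_bin_command (token : List String) (binary : List String) (channel : List String) : String :=
  let string0 := "\tenum tok_t retrieve_bin_command(uint8_t command) {\n"
  -- for i in range(0, len(binary)): partition [token[i], binary[i]] by int(channel[i]) > 0
  -- (pyGetD defaults / .getD 0 only totalize; Pre_ keeps indices in range and int() succeeding)
  let part := (PySem.List.pyRange 0 (binary.length : Int) 1).foldl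
    (fun (p : List (String × String) × List (String × String)) i =>
      if ((PySem.Int.ofStr? (PySem.List.pyGetD channel i "")).getD 0) > 0 then
        (p.1 ++ [(PySem.List.pyGetD token i "", PySem.List.pyGetD binary i "")], p.2)
      else
        (p.1, p.2 ++ [(PySem.List.pyGetD token i "", PySem.List.pyGetD binary i "")]))
    ([], [])
  let with_channel := part.1
  let without_channel := part.2
  let s1 := string0 ++ "\t\tswitch(command) {\n"
  let s2 := (PySem.List.pyRange 0 (without_channel.length : Int) 1).foldl
    (fun s i =>
      s ++ "\t\t\tcase " ++ (PySem.List.pyGetD without_channel i ("", "")).2 ++ ":\n"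
        ++ "\t\t\t\treturn " ++ (PySem.List.pyGetD without_channel i ("", "")).1 ++ ";\n") s1
  let s3 := s2 ++ "\t\t}\n" ++ "\t\tswitch(command&0x0F) {\n"
  let s4 := (PySem.List.pyRange 0 (with_channel.length : Int) 1).foldl
    (fun s i =>
      s ++ "\t\t\tcase " ++ (PySem.List.pyGetD with_channel i ("", "")).2 ++ ":\n"
        ++ "\t\t\t\treturn " ++ (PySem.List.pyGetD with_channel i ("", "")).1 ++ ";\n") s3
  s4 ++ "\t\t}\n" ++ "\t\treturn REJECT;\n" ++ "\t}\n"

-- ===== PORT B =====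
-- literal transliteration of Source B: one pass accumulating the two string bodies directly
def retrieve_bin_command_alt (token : List String) (binary : List String) (channel : List String) : String :=
  let bodies := (PySem.List.pyRange 0 (binary.length : Int) 1).foldl
    (fun (q : String × String) i =>
      let entry := "\t\t\tcase " ++ (PySem.List.pyGetD binary i "") ++ ":\n\t\t\t\treturn "
        ++ (PySem.List.pyGetD token i "") ++ ";\n"
      if ((PySem.Int.ofStr? (PySem.List.pyGetD channel i "")).getD 0) > 0 then
        (q.1 ++ entry, q.2)
      else
        (q.1, q.2 ++ entry))
    ("", "")
  "\tenum tok_t retrieve_bin_command(uint8_t command) {\n"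
    ++ "\t\tswitch(command) {\n" ++ bodies.2 ++ "\t\t}\n"
    ++ "\t\tswitch(command&0x0F) {\n" ++ bodies.1 ++ "\t\t}\n"
    ++ "\t\treturn REJECT;\n\t}\n"

-- ===== PRECONDITION & SPEC =====
-- Pre_ excludes exactly the inputs on which Python A raises: an index past the end of token or
-- channel (IndexError) or a channel entry int() cannot parse (ValueError); B raises there too.
def Pre_retrieve_bin_command (token : List String) (binary : List String) (channel : List String) : Prop :=
  binary.length ≤ token.length ∧ binary.length ≤ channel.length ∧
    ∀ s ∈ channel.take binary.length, (PySem.Int.ofStr? s).isSome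
instance (token : List String) (binary : List String) (channel : List String) : Decidable (Pre_retrieve_bin_command token binary channel) := by unfold Pre_retrieve_bin_command; infer_instance
def pvWitness_retrieve_bin_command : List String × List String × List String :=
  (["T_ON", "T_OFF"], ["0x01", "0x10"], ["1", "0"])
def Spec_retrieve_bin_command (token : List String) (binary : List String) (channel : List String) (out : String) : Prop := out = retrieve_bin_command_alt token binary channel
instance (token : List String) (binary : List String) (channel : List String) (out : String) : Decidable (Spec_retrieve_bin_command token binary channel out) := by unfold Spec_retrieve_bin_command; infer_instance

-- ===== CLAIM (what is proved, stated in full; the proofs are below) =====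
def Claim_equal_retrieve_bin_command : Prop := ∀ (token : List String) (binary : List String) (channel : List String), Dom_retrieve_bin_command token binary channel → Pre_retrieve_bin_command token binary channel → Spec_retrieve_bin_command token binary channel (retrieve_bin_command token binary channel)

-- ===== LEMMAS AND PROOFS =====

-- proof-only helper: concatenation of a list of strings
def pvJoin : List String → String
  | [] => ""
  | x :: xs => x ++ pvJoin xs

-- A's partitioning loop: components as filter/map
theorem pvFoldPairList {α : Type} (P : Int → Prop) [DecidablePred P] (g : Int → α)
    (l : List Int) (a b : List α) :
    l.foldl (fun q i => if P i then (q.1 ++ [g i], q.2) else (q.1, q.2 ++ [g i])) (a, b)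
      = (a ++ (l.filter (fun i => decide (P i))).map g,
         b ++ (l.filter (fun i => ! decide (P i))).map g) := by
  induction l generalizing a b with
  | nil => simp
  | cons x xs ih => by_cases h : P x <;> simp [h, ih]

-- B's loop: components as joined rendered entries
theorem pvFoldPairStr (P : Int → Prop) [DecidablePred P] (r : Int → String)
    (l : List Int) (a b : String) :
    l.foldl (fun q i => if P i then (q.1 ++ r i, q.2) else (q.1, q.2 ++ r i)) (a, b)
      = (a ++ pvJoin ((l.filter (fun i => decide (P i))).map r),
         b ++ pvJoin ((l.filter (fun i => ! decide (P i))).map r)) := by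
  induction l generalizing a b with
  | nil => simp [pvJoin]
  | cons x xs ih => by_cases h : P x <;> simp [h, ih, pvJoin, String.append_assoc]

-- A's render loops: a string-accumulating fold is the prefix plus the joined entries
theorem pvFoldRender {α : Type} (c1 c2 c3 c4 : String) (f g : α → String)
    (xs : List α) (s : String) :
    xs.foldl (fun acc e => acc ++ c1 ++ f e ++ c2 ++ c3 ++ g e ++ c4) s
      = s ++ pvJoin (xs.map (fun e => c1 ++ (f e ++ (c2 ++ c3 ++ (g e ++ c4))))) := by
  induction xs generalizing s with
  | nil => simp [pvJoin]
  | cons x xs ih => simp only [List.foldl_cons, ih, List.map_cons, pvJoin]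
                    simp [String.append_assoc]

-- ===== VERDICT (by name: the statement is the Claim_ definition above) =====
theorem retrieve_bin_command_spec : Claim_equal_retrieve_bin_command := by
  intro token binary channel _ _
  unfold Spec_retrieve_bin_command retrieve_bin_command retrieve_bin_command_alt
  rw [pvFoldPairList (fun i => ((PySem.Int.ofStr? (PySem.List.pyGetD channel i "")).getD 0) > 0)
        (fun i => (PySem.List.pyGetD token i "", PySem.List.pyGetD binary i "")),
      pvFoldPairStr (fun i => ((PySem.Int.ofStr? (PySem.List.pyGetD channel i "")).getD 0) > 0)
        (fun i => "\t\t\tcase " ++ (PySem.List.pyGetD binary i "") ++ ":\n\t\t\t\treturn "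
          ++ (PySem.List.pyGetD token i "") ++ ";\n")]
  simp only [PySem.List.foldl_pyRange_zero_pyGetD'
      (d := (("" : String), ("" : String)))
      (f := fun (s : String) (e : String × String) =>
        s ++ "\t\t\tcase " ++ e.2 ++ ":\n" ++ "\t\t\t\treturn " ++ e.1 ++ ";\n")]
  simp only [pvFoldRender "\t\t\tcase " ":\n" "\t\t\t\treturn " ";\n"
      (fun (e : String × String) => e.2) (fun (e : String × String) => e.1)]
  simp [String.append_assoc, List.map_map, Function.comp_def]
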